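-- pv_equiv track=rewrite | github.com/gunSlaveUnit/cinemafan | movies/utils.py | form_periods_movie_showing
-- ===== SOURCE A (Python) =====
-- def form_periods_movie_showing(years: list[int]) -> str:
--     """
--     Makes a template-ready string - what time movie was shown.
--
--     If there are several years in ascending order,
--     write the first and last, with a dash between them.
--     If not, a comma.
--
--     Args:
--         years (list[int]): List of years to format.
--
--     Returns:
--         str: Formatted string of years,
--             ready to be inserted into a template
--             as the period in which the movie was shown.
--     """
--
--     years = sorted(set(years))
--
--     periods = []
--     period_start = years[0]
--     previous = years[0]
--
--     for year in years[1:] + [None]: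
--         if year != previous + 1:
--             if period_start != previous:
--                 periods.append(f"{period_start} - {previous}")
--             else:
--                 periods.append(str(period_start))
--             period_start = year
--         previous = year
--
--     return ", ".join(periods)
-- ===== SOURCE B (Python) =====
-- def form_periods_movie_showing(years: list[int]) -> str:
--     """Boundary detection via set membership: a year starts a run iff year-1
--     is absent from the set, ends a run iff year+1 is absent; zip the sorted
--     boundary lists together and format each (start, end) pair."""
--     s = set(years)
--     starts = sorted(y for y in s if y - 1 not in s)
--     ends = sorted(y for y in s if y + 1 not in s)
--     return ", ".join(str(a) if a == b else f"{a} - {b}" for a, b in zip(starts, ends))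
-- ===== Notes on version B (the rewrite author's own statement) =====
-- stated objective: alternative
-- what changed: Replaces A's single sequential sentinel-driven accumulator loop with set-membership boundary detection: run starts are the years whose predecessor is not in the set, run ends those whose successor is not, and the two sorted boundary lists are zipped and formatted.
import Mathlib
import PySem

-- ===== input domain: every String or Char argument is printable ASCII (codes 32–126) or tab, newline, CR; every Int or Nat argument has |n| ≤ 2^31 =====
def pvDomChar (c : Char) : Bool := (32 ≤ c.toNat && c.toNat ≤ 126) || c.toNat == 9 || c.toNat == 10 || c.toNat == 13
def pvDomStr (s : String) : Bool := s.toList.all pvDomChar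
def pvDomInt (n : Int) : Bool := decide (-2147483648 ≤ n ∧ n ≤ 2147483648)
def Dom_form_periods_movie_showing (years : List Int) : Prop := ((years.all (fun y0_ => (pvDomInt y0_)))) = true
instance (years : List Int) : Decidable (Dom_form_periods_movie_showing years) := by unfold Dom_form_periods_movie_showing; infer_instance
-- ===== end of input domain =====

-- B replaces A's sequential sentinel-driven accumulator loop by set-membership boundary
-- detection (run starts = years whose predecessor is absent, run ends = years whose
-- successor is absent, zipped together): alternative algorithm, same cost.

-- ===== PORT A =====
-- f-string rendering of a possibly-None int variable (Python prints None as "None"; only ints are reachable here)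
def pvOptStr (o : Option Int) : String :=
  match o with
  | some a => PySem.Int.toStr a
  | none => "None"

-- body of A's for-loop; state = (periods, period_start, previous)
def fpA_step (st : List String × Option Int × Option Int) (year : Option Int) :
    List String × Option Int × Option Int :=
  let (periods, period_start, previous) := st
  if year ≠ previous.map (· + 1) then
    (periods ++ [if period_start ≠ previous
                 then pvOptStr period_start ++ " - " ++ pvOptStr previous
                 else pvOptStr period_start],
     year, year)
  else (periods, period_start, year)

def form_periods_movie_showing (years : List Int) : String :=
  let ys := PySem.List.sorted (PySem.Set.ofList years) (fun x => x) false
  match ys with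
  | [] => ""   -- years[0] raises IndexError in Python; excluded by Pre_
  | y0 :: rest =>
    let fin := (rest.map some ++ [none]).foldl fpA_step ([], some y0, some y0)
    PySem.Str.join ", " fin.1

-- ===== PORT B =====
def fpB_fmt (r : Int × Int) : String :=
  if r.1 == r.2 then PySem.Int.toStr r.1
  else PySem.Int.toStr r.1 ++ " - " ++ PySem.Int.toStr r.2

def form_periods_movie_showing_alt (years : List Int) : String :=
  let s : List Int := PySem.Set.ofList years
  let starts := PySem.List.sorted (s.filter (fun y => !(s.contains (y - 1)))) (fun x => x) false
  let ends := PySem.List.sorted (s.filter (fun y => !(s.contains (y + 1)))) (fun x => x) false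
  PySem.Str.join ", " ((starts.zip ends).map fpB_fmt)

-- ===== PRECONDITION & SPEC =====
-- Pre_ excludes only the empty list, on which Python A raises IndexError (years[0]).
def Pre_form_periods_movie_showing (years : List Int) : Prop := years ≠ []
instance (years : List Int) : Decidable (Pre_form_periods_movie_showing years) := by
  unfold Pre_form_periods_movie_showing; infer_instance
def pvWitness_form_periods_movie_showing : List Int := [2000, 2001, 2003]

def Spec_form_periods_movie_showing (years : List Int) (out : String) : Prop :=
  out = form_periods_movie_showing_alt years
instance (years : List Int) (out : String) : Decidable (Spec_form_periods_movie_showing years out) := by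
  unfold Spec_form_periods_movie_showing; infer_instance

-- ===== CLAIM (what is proved, stated in full; the proofs are below) =====
def Claim_equal_form_periods_movie_showing : Prop :=
  ∀ (years : List Int), Dom_form_periods_movie_showing years →
    Pre_form_periods_movie_showing years →
    Spec_form_periods_movie_showing years (form_periods_movie_showing years)

-- ===== LEMMAS AND PROOFS =====

-- the run intervals of the strictly increasing list b :: l, the first run having started at a
def fpRuns (a b : Int) : List Int → List (Int × Int)
  | [] => [(a, b)]
  | y :: t => if y = b + 1 then fpRuns a y t else (a, b) :: fpRuns y y t

-- local recursion computing B's run starts (minus the head) from adjacency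
def fpGoS (p : Int) : List Int → List Int
  | [] => []
  | y :: t => if y = p + 1 then fpGoS y t else y :: fpGoS y t

-- local recursion computing B's run ends from adjacency
def fpGoE (p : Int) : List Int → List Int
  | [] => [p]
  | y :: t => if y = p + 1 then fpGoE y t else p :: fpGoE y t

theorem fpRuns_fst (l : List Int) : ∀ a b, (fpRuns a b l).map Prod.fst = a :: fpGoS b l := by
  induction l with
  | nil => intro a b; simp [fpRuns, fpGoS]
  | cons y t ih =>
    intro a b
    by_cases h : y = b + 1 <;> simp [fpRuns, fpGoS, h, ih]

theorem fpRuns_snd (l : List Int) : ∀ a b, (fpRuns a b l).map Prod.snd = fpGoE b l := by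
  induction l with
  | nil => intro a b; simp [fpRuns, fpGoE]
  | cons y t ih =>
    intro a b
    by_cases h : y = b + 1 <;> simp [fpRuns, fpGoE, h, ih]

theorem fp_zip_runs {α β : Type} (R : List (α × β)) :
    (R.map Prod.fst).zip (R.map Prod.snd) = R := by
  induction R with
  | nil => rfl
  | cons r t ih => simp [ih]

-- A's loop produces exactly the formatted run intervals
theorem fpA_loop (rest : List Int) : ∀ (acc : List String) (a b : Int),
    ((rest.map some ++ [none]).foldl fpA_step (acc, some a, some b)).1
      = acc ++ (fpRuns a b rest).map fpB_fmt := by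
  induction rest with
  | nil =>
    intro acc a b
    by_cases h : a = b <;> simp [fpA_step, fpRuns, fpB_fmt, pvOptStr, h]
  | cons y t ih =>
    intro acc a b
    by_cases h : y = b + 1
    · have hA : fpA_step (acc, some a, some b) (some y) = (acc, some a, some y) := by
        simp [fpA_step, h]
      simp only [List.map_cons, List.cons_append, List.foldl_cons, hA, ih, fpRuns, if_pos h]
    · have hA : fpA_step (acc, some a, some b) (some y)
          = (acc ++ [fpB_fmt (a, b)], some y, some y) := by
        by_cases hab : a = b <;> simp [fpA_step, h, fpB_fmt, pvOptStr, hab]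
      simp only [List.map_cons, List.cons_append, List.foldl_cons, hA]
      rw [ih]
      simp [fpRuns, if_neg h]

-- no element of a strictly increasing pre ++ p :: y :: t lies strictly between p and y
theorem fp_no_between {ys pre t : List Int} {p y z : Int}
    (hys : ys.Pairwise (· < ·)) (hsplit : ys = pre ++ p :: y :: t)
    (hz : z ∈ ys) (h1 : p < z) (h2 : z < y) : False := by
  subst hsplit
  rcases List.mem_append.1 hz with hz | hz
  · have := (List.pairwise_append.1 hys).2.2 z hz p (by simp)
    omega
  · rcases hz with _ | ⟨_, hz⟩
    · omega
    have hrest := (List.pairwise_append.1 hys).2.1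
    rcases hz with _ | ⟨_, hz⟩
    · omega
    · have := (List.pairwise_cons.1 (List.pairwise_cons.1 hrest).2).1 z hz
      omega

-- run starts (tail part): filter over the whole list via global membership = local adjacency recursion
theorem fpS_suffix (ys : List Int) (hys : ys.Pairwise (· < ·)) :
    ∀ (l : List Int) (pre : List Int) (p : Int), ys = pre ++ p :: l →
      l.filter (fun y => !(ys.contains (y - 1))) = fpGoS p l := by
  intro l
  induction l with
  | nil => intro pre p _; simp [fpGoS]
  | cons y t ih =>
    intro pre p hsplit
    have hpy : p < y := by
      have := hsplit ▸ hys
      have h2 := (List.pairwise_append.1 this).2.1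
      exact (List.pairwise_cons.1 h2).1 y (by simp)
    have hmem : (y - 1 ∈ ys) ↔ y = p + 1 := by
      constructor
      · intro hzin
        by_contra h
        exact fp_no_between hys hsplit hzin (by omega) (by omega)
      · intro h
        rw [hsplit]
        have : y - 1 = p := by omega
        simp [this]
    have hp : p ∈ ys := by rw [hsplit]; simp
    have ih' := ih (pre ++ [p]) y (by simpa using hsplit)
    rw [List.filter_cons, ih']
    by_cases h : y = p + 1 <;>
      simp [fpGoS, h, hmem, hp]

-- run ends: the whole-list filter, via global membership = local adjacency recursion
theorem fpE_suffix (ys : List Int) (hys : ys.Pairwise (· < ·)) :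
    ∀ (l : List Int) (pre : List Int) (p : Int), ys = pre ++ p :: l →
      (p :: l).filter (fun y => !(ys.contains (y + 1))) = fpGoE p l := by
  intro l
  induction l with
  | nil =>
    intro pre p hsplit
    have hnm : p + 1 ∉ ys := by
      intro hzin
      subst hsplit
      rcases List.mem_append.1 hzin with hz | hz
      · have := (List.pairwise_append.1 hys).2.2 _ hz p (by simp)
        omega
      · simp only [List.mem_cons, List.not_mem_nil, or_false] at hz
        omega
    simp [hnm, fpGoE]
  | cons y t ih =>
    intro pre p hsplit
    have hpy : p < y := by
      have := hsplit ▸ hys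
      have h2 := (List.pairwise_append.1 this).2.1
      exact (List.pairwise_cons.1 h2).1 y (by simp)
    have hmem : (p + 1 ∈ ys) ↔ y = p + 1 := by
      constructor
      · intro hzin
        by_contra h
        exact fp_no_between hys hsplit hzin (by omega) (by omega)
      · intro h
        rw [hsplit, ← h]
        simp
    have ih' := ih (pre ++ [p]) y (by simpa using hsplit)
    rw [List.filter_cons, ih']
    by_cases h : y = p + 1 <;>
      simp [fpGoE, h, hmem]

-- sorting the filtered set = filtering the sorted set-of-list
theorem fp_sorted_filter (xs : List Int) (p : Int → Bool) :
    PySem.List.sorted ((PySem.Set.ofList xs).filter p) (fun x => x) false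
      = (PySem.List.sorted (PySem.Set.ofList xs) (fun x => x) false).filter p := by
  apply PySem.List.sorted_eq_of_perm_of_pairwise_lt
  · exact (PySem.List.sorted_perm (PySem.Set.ofList xs) (fun x => x) false).filter p
  · exact List.Pairwise.sublist List.filter_sublist (PySem.List.sorted_ofList_pairwise_lt xs)

-- membership in the set equals membership in its sorted version
theorem fp_contains_sorted (xs : List Int) (x : Int) :
    List.contains (PySem.Set.ofList xs) x
      = (PySem.List.sorted (PySem.Set.ofList xs) (fun x => x) false).contains x := by
  rw [Bool.eq_iff_iff]
  simp [PySem.List.mem_sorted]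

-- B's starts/ends filters over the sorted set, expressed by the local adjacency recursions
theorem fpB_starts (xs : List Int) (y0 : Int) (rest : List Int)
    (h : PySem.List.sorted (PySem.Set.ofList xs) (fun x => x) false = y0 :: rest) :
    PySem.List.sorted ((PySem.Set.ofList xs).filter
        (fun y => !(List.contains (PySem.Set.ofList xs) (y - 1)))) (fun x => x) false
      = y0 :: fpGoS y0 rest := by
  rw [fp_sorted_filter,
      List.filter_congr (fun x _ => by rw [fp_contains_sorted xs (x - 1)]), h]
  have hpw : (y0 :: rest).Pairwise (· < ·) := h ▸ PySem.List.sorted_ofList_pairwise_lt xs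
  have hhead : y0 - 1 ∉ (y0 :: rest) := by
    simp only [List.mem_cons]
    rintro (h1 | h1)
    · omega
    · have := (List.pairwise_cons.1 hpw).1 _ h1
      omega
  have htail := fpS_suffix (y0 :: rest) hpw rest [] y0 rfl
  rw [List.filter_cons, htail]
  simp [hhead]

theorem fpB_ends (xs : List Int) (y0 : Int) (rest : List Int)
    (h : PySem.List.sorted (PySem.Set.ofList xs) (fun x => x) false = y0 :: rest) :
    PySem.List.sorted ((PySem.Set.ofList xs).filter
        (fun y => !(List.contains (PySem.Set.ofList xs) (y + 1)))) (fun x => x) false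
      = fpGoE y0 rest := by
  rw [fp_sorted_filter,
      List.filter_congr (fun x _ => by rw [fp_contains_sorted xs (x + 1)]), h]
  have hpw : (y0 :: rest).Pairwise (· < ·) := h ▸ PySem.List.sorted_ofList_pairwise_lt xs
  exact fpE_suffix (y0 :: rest) hpw rest [] y0 rfl

-- ===== VERDICT (by name: the statement is the Claim_ definition above) =====
theorem form_periods_movie_showing_spec : Claim_equal_form_periods_movie_showing := by
  intro years _ _
  unfold Spec_form_periods_movie_showing form_periods_movie_showing form_periods_movie_showing_alt
  cases h : PySem.List.sorted (PySem.Set.ofList years) (fun x => x) false with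
  | nil =>
    have hnil : PySem.Set.ofList years = [] := by
      have := (PySem.List.sorted_perm (PySem.Set.ofList years) (fun x => x) false)
      rw [h] at this
      exact (List.Perm.nil_eq this).symm
    simp [hnil, PySem.List.sorted, PySem.Str.join]
  | cons y0 rest =>
    have hs := fpB_starts years y0 rest h
    have he := fpB_ends years y0 rest h
    dsimp only
    rw [hs, he]
    have hz : ((y0 :: fpGoS y0 rest).zip (fpGoE y0 rest)).map fpB_fmt
        = (fpRuns y0 y0 rest).map fpB_fmt := by
      rw [← fpRuns_fst rest y0 y0, ← fpRuns_snd rest y0 y0, fp_zip_runs]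
    rw [hz]
    exact congrArg (PySem.Str.join ", ") (fpA_loop rest [] y0 y0)
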